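-- pv_equiv track=rewrite | github.com/911AstalusAdrian/S1-FP | Projects/a2-911AstalusAdrian/src/program.py | get_real_sequence
-- ===== SOURCE A (Python) =====
-- def get_imaginary(number):
--     return number[1]
--
-- def get_real_sequence(list):
--     """
--     Determining the length and the last index of the longest sequence of real numbers
--     :param list: The list we're about to check
--     :return: A list, where the first element is the length, the second being the last index
--     """
--     sequence_data = []
--     final_position = 0
--     temporary_position = 0
--     maximum_length = 0
--     temporary_length = 0
--     for index, number in enumerate(list):
--         if get_imaginary(number) == 0:
--             temporary_length += 1
--             temporary_position = index
--         else:
--             if temporary_length >= maximum_length: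
--                 maximum_length = temporary_length
--                 final_position = temporary_position
--             temporary_length = 0
--     if temporary_length >= maximum_length:
--         maximum_length = temporary_length
--         final_position = temporary_position
--     sequence_data.append(maximum_length)
--     sequence_data.append(final_position)
--     return sequence_data
-- ===== SOURCE B (Python) =====
-- def get_imaginary(number):
--     return number[1]
--
-- def get_real_sequence(list):
--     # Phase 1: build every maximal run of real numbers as (length, last_index).
--     runs = []
--     run_length = 0
--     run_last = 0
--     for index, number in enumerate(list):
--         if get_imaginary(number) == 0:
--             run_length += 1
--             run_last = index
--         else:
--             if run_length > 0:
--                 runs.append((run_length, run_last))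
--             run_length = 0
--     if run_length > 0:
--         runs.append((run_length, run_last))
--     # Phase 2: select the best run (longest; latest on ties).
--     if not runs:
--         return [0, 0]
--     best = max(runs, key=lambda r: (r[0], r[1]))
--     return [best[0], best[1]]
-- ===== Notes on version B (the rewrite author's own statement) =====
-- stated objective: alternative
-- what changed: B first builds the explicit list of maximal real-number runs as (length, last_index) pairs and then selects the winner in a separate pass with max(runs, key=(length, last_index)), instead of A's inline >=-tie-break maximum tracking with four running variables.
import Mathlib
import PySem

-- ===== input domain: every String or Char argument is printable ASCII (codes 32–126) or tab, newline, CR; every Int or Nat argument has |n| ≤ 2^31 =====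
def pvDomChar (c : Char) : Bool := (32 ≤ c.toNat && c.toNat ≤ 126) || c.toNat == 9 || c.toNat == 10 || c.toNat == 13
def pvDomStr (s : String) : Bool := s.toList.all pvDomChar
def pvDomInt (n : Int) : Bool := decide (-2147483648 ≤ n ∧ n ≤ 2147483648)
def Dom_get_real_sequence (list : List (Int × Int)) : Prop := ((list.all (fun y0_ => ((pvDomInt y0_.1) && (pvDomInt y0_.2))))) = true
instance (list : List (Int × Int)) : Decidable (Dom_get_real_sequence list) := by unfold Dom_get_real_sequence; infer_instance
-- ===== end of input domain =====

-- B builds the list of maximal real runs (length, last_index) and selects the best in a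
-- second pass; A tracks the maximum inline. Same O(n) cost; objective: alternative structure.

-- ===== PORT A =====
-- A's loop: state (final_position, temporary_position, maximum_length, temporary_length).
def get_imaginary (number : Int × Int) : Int := number.2

def aLoop : List (Int × Int) → Int → Int → Int → Int → Int → Int × Int × Int × Int
  | [], _, fp, tp, ml, tl => (fp, tp, ml, tl)
  | number :: rest, index, fp, tp, ml, tl =>
      if get_imaginary number = 0 then
        aLoop rest (index + 1) fp index ml (tl + 1)
      else
        if tl ≥ ml then aLoop rest (index + 1) tp tp tl 0
        else aLoop rest (index + 1) fp tp ml 0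

def get_real_sequence (list : List (Int × Int)) : List Int :=
  match aLoop list 0 0 0 0 0 with
  | (fp, tp, ml, tl) => if tl ≥ ml then [tl, tp] else [ml, fp]

-- ===== PORT B =====
-- Phase 1 of Source B: accumulate the maximal runs (run_length, run_last) in order.
def bRuns : List (Int × Int) → Int → List (Int × Int) → Int → Int → List (Int × Int)
  | [], _, runs, cl, cp => if cl > 0 then runs ++ [(cl, cp)] else runs
  | number :: rest, index, runs, cl, cp =>
      if get_imaginary number = 0 then
        bRuns rest (index + 1) runs (cl + 1) index
      else
        bRuns rest (index + 1) (if cl > 0 then runs ++ [(cl, cp)] else runs) 0 cp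

-- Python's max with key (r[0], r[1]): first element with strictly greatest key wins.
def bestRun (b r : Int × Int) : Int × Int :=
  if r.1 > b.1 ∨ (r.1 = b.1 ∧ r.2 > b.2) then r else b

-- Phase 2 of Source B: empty → [0,0], otherwise max over the runs.
def get_real_sequence_alt (list : List (Int × Int)) : List Int :=
  match bRuns list 0 [] 0 0 with
  | [] => [0, 0]
  | h :: t => let best := t.foldl bestRun h; [best.1, best.2]

-- ===== PRECONDITION & SPEC =====
def Spec_get_real_sequence (list : List (Int × Int)) (out : List Int) : Prop := out = get_real_sequence_alt list
instance (list : List (Int × Int)) (out : List Int) : Decidable (Spec_get_real_sequence list out) := by unfold Spec_get_real_sequence; infer_instance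

-- ===== CLAIM (what is proved, stated in full; the proofs are below) =====
def Claim_equal_get_real_sequence : Prop := ∀ (list : List (Int × Int)), Dom_get_real_sequence list → Spec_get_real_sequence list (get_real_sequence list)

-- ===== LEMMAS AND PROOFS =====

-- Selecting from a nonempty list of positive-length runs equals folding from the (0,0) seed.
def bFinish (rs : List (Int × Int)) : List Int :=
  match rs with
  | [] => [0, 0]
  | h :: t => let best := t.foldl bestRun h; [best.1, best.2]

lemma bFinish_eq (rs : List (Int × Int)) (hpos : ∀ r ∈ rs, 1 ≤ r.1) :
    bFinish rs = [(rs.foldl bestRun (0, 0)).1, (rs.foldl bestRun (0, 0)).2] := by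
  cases rs with
  | nil => simp [bFinish]
  | cons h t =>
    have h1 : 1 ≤ h.1 := hpos h (by simp)
    have : bestRun (0, 0) h = h := by
      simp [bestRun]; omega
    simp [bFinish, List.foldl_cons, this]

lemma get_real_sequence_alt_eq (l : List (Int × Int)) :
    get_real_sequence_alt l = bFinish (bRuns l 0 [] 0 0) := by
  simp [get_real_sequence_alt, bFinish]

-- Main invariant lemma: A's inline maximum equals B's build-then-select, given that
-- the folded best over the accumulated runs is exactly A's (maximum_length, final_position)
-- and the bookkeeping invariants that reachable states satisfy.
lemma main_lemma (l : List (Int × Int)) :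
    ∀ (i fp tp ml tl : Int) (runs : List (Int × Int)),
    0 ≤ tl → 0 ≤ ml →
    (1 ≤ tl → tp < i) → (1 ≤ ml → fp < i) →
    (1 ≤ tl → 1 ≤ ml → fp < tp) →
    (tl = 0 → ml = 0 → tp = 0 ∧ fp = 0) →
    (∀ r ∈ runs, 1 ≤ r.1) →
    runs.foldl bestRun (0, 0) = (ml, fp) →
    (match aLoop l i fp tp ml tl with
     | (fp', tp', ml', tl') => if tl' ≥ ml' then [tl', tp'] else [ml', fp']) =
    bFinish (bRuns l i runs tl tp) := by
  induction l with
  | nil =>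
    intro i fp tp ml tl runs htl hml htpi hfpi hfptp hzero hpos hsel
    simp only [aLoop, bRuns]
    by_cases hc : tl > 0
    · rw [if_pos hc]
      have hpos' : ∀ r ∈ runs ++ [(tl, tp)], 1 ≤ r.1 := by
        intro r hr; simp at hr
        rcases hr with hr | hr
        · exact hpos r hr
        · simp [hr]; omega
      rw [bFinish_eq _ hpos', List.foldl_append, hsel]
      simp only [List.foldl_cons, List.foldl_nil]
      by_cases hge : tl ≥ ml
      · rw [if_pos hge]
        by_cases heq : tl = ml
        · have hlt : fp < tp := hfptp (by omega) (by omega)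
          have hcond : ((tl, tp).1 > (ml, fp).1 ∨ ((tl, tp).1 = (ml, fp).1 ∧ (tl, tp).2 > (ml, fp).2)) := by
            simp; omega
          simp [bestRun, hcond]
        · have hcond : ((tl, tp).1 > (ml, fp).1 ∨ ((tl, tp).1 = (ml, fp).1 ∧ (tl, tp).2 > (ml, fp).2)) := by
            simp; omega
          simp [bestRun, hcond]
      · rw [if_neg hge]
        have hcond : ¬ ((tl, tp).1 > (ml, fp).1 ∨ ((tl, tp).1 = (ml, fp).1 ∧ (tl, tp).2 > (ml, fp).2)) := by
          simp; omega
        simp [bestRun, hcond]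
    · rw [if_neg hc]
      rw [bFinish_eq _ hpos, hsel]
      by_cases hge : tl ≥ ml
      · obtain ⟨htp0, hfp0⟩ := hzero (by omega) (by omega)
        have htl0 : tl = 0 := by omega
        have hml0 : ml = 0 := by omega
        simp [htl0, hml0, htp0, hfp0]
      · rw [if_neg hge]
  | cons x rest ih =>
    intro i fp tp ml tl runs htl hml htpi hfpi hfptp hzero hpos hsel
    by_cases hx : get_imaginary x = 0
    · simp only [aLoop, bRuns, if_pos hx]
      exact ih (i + 1) fp i ml (tl + 1) runs (by omega) hml
        (fun _ => by omega) (fun h => by have := hfpi h; omega)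
        (fun _ h => by have := hfpi h; omega)
        (fun h _ => by omega) hpos hsel
    · simp only [aLoop, bRuns, if_neg hx]
      by_cases hc : tl > 0
      · rw [if_pos hc]
        have hpos' : ∀ r ∈ runs ++ [(tl, tp)], 1 ≤ r.1 := by
          intro r hr; simp at hr
          rcases hr with hr | hr
          · exact hpos r hr
          · simp [hr]; omega
        have hsel' : (runs ++ [(tl, tp)]).foldl bestRun (0, 0) =
            (if tl ≥ ml then ((tl, tp) : Int × Int) else (ml, fp)) := by
          rw [List.foldl_append, hsel]
          simp only [List.foldl_cons, List.foldl_nil]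
          by_cases hge : tl ≥ ml
          · rw [if_pos hge]
            by_cases heq : tl = ml
            · have hlt : fp < tp := hfptp (by omega) (by omega)
              have hcond : ((tl, tp).1 > (ml, fp).1 ∨ ((tl, tp).1 = (ml, fp).1 ∧ (tl, tp).2 > (ml, fp).2)) := by
                simp; omega
              simp [bestRun, hcond]
            · have hcond : ((tl, tp).1 > (ml, fp).1 ∨ ((tl, tp).1 = (ml, fp).1 ∧ (tl, tp).2 > (ml, fp).2)) := by
                simp; omega
              simp [bestRun, hcond]
          · rw [if_neg hge]
            have hcond : ¬ ((tl, tp).1 > (ml, fp).1 ∨ ((tl, tp).1 = (ml, fp).1 ∧ (tl, tp).2 > (ml, fp).2)) := by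
              simp; omega
            simp [bestRun, hcond]
        by_cases hge : tl ≥ ml
        · rw [if_pos hge]
          refine ih (i + 1) tp tp tl 0 (runs ++ [(tl, tp)]) le_rfl (by omega)
            (by omega) (fun _ => by have := htpi (by omega); omega)
            (by omega) (by omega) hpos' ?_
          rw [hsel', if_pos hge]
        · rw [if_neg hge]
          refine ih (i + 1) fp tp ml 0 (runs ++ [(tl, tp)]) le_rfl hml
            (by omega) (fun h => by have := hfpi h; omega)
            (by omega) (fun _ h => by omega) hpos' ?_
          rw [hsel', if_neg hge]
      · rw [if_neg hc]
        by_cases hge : tl ≥ ml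
        · rw [if_pos hge]
          obtain ⟨htp0, hfp0⟩ := hzero (by omega) (by omega)
          refine ih (i + 1) tp tp tl 0 runs le_rfl (by omega)
            (by omega) (fun h => by omega) (by omega) ?_ hpos ?_
          · intro _ _
            constructor <;> omega
          · rw [hsel]
            have h1 : ml = 0 := by omega
            have h2 : tl = 0 := by omega
            simp [h1, h2, hfp0, htp0]
        · rw [if_neg hge]
          exact ih (i + 1) fp tp ml 0 runs le_rfl hml (by omega)
            (fun h => by have := hfpi h; omega) (by omega)
            (fun _ h => by omega) hpos hsel

-- ===== VERDICT (by name: the statement is the Claim_ definition above) =====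
theorem get_real_sequence_spec : Claim_equal_get_real_sequence := by
  intro list _
  unfold Spec_get_real_sequence
  rw [get_real_sequence_alt_eq]
  have := main_lemma list 0 0 0 0 0 [] le_rfl le_rfl
    (by omega) (by omega) (by omega) (fun _ _ => ⟨rfl, rfl⟩)
    (by simp) (by simp)
  unfold get_real_sequence
  exact this
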